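-- pv_equiv track=rewrite | github.com/buggy213/opencl-raytracing | crates/visual-testing/src/rttest/perf.py | parse_render_args
-- ===== SOURCE A (Python) =====
-- def parse_render_args(renderer_args: list[str]) -> tuple[int | None, int | None]:
--     """Extract samples_per_pixel and light_samples from renderer args."""
--     spp = None
--     light = None
--     i = 0
--     while i < len(renderer_args):
--         arg = renderer_args[i]
--         if arg in ("-s", "--samples"):
--             if i + 1 < len(renderer_args):
--                 try:
--                     spp = int(renderer_args[i + 1])
--                 except ValueError:
--                     pass
--             i += 2
--         elif arg in ("-l", "--light-samples"):
--             if i + 1 < len(renderer_args):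
--                 try:
--                     light = int(renderer_args[i + 1])
--                 except ValueError:
--                     pass
--             i += 2
--         else:
--             i += 1
--     return spp, light
-- ===== SOURCE B (Python) =====
-- def parse_render_args(renderer_args: list[str]) -> tuple[int | None, int | None]:
--     """Extract samples_per_pixel and light_samples from renderer args."""
--     spp = None
--     light = None
--     pending = None
--     for tok in renderer_args:
--         if pending == 's':
--             try:
--                 spp = int(tok)
--             except ValueError:
--                 pass
--             pending = None
--         elif pending == 'l':
--             try:
--                 light = int(tok)
--             except ValueError:
--                 pass
--             pending = None
--         elif tok in ("-s", "--samples"):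
--             pending = 's'
--         elif tok in ("-l", "--light-samples"):
--             pending = 'l'
--     return spp, light
-- ===== Notes on version B (the rewrite author's own statement) =====
-- stated objective: alternative
-- what changed: Replaced the while-loop with explicit index arithmetic and variable step (i += 1 or 2) by a single for-each pass that defers value parsing through a 'pending' state variable, so no indexing occurs at all.
import Mathlib
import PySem

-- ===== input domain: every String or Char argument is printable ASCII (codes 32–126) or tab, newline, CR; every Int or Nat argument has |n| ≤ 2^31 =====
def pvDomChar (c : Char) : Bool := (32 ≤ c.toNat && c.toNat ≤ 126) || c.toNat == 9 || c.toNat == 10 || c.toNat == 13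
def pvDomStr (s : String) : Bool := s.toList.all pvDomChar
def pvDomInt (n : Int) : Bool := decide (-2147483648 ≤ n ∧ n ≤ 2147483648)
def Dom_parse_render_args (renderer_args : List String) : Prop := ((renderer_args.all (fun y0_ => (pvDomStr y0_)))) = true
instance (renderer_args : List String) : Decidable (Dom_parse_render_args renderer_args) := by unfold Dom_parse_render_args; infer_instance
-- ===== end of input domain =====

-- B replaces A's index-walk (i += 1 or 2) by a single for-each pass with a 'pending' state; same cost, different decomposition.


-- ===== PORT A =====
-- A's while loop over index i: each iteration reads renderer_args[i]; a flag consumes the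
-- following token too (i += 2), anything else steps by one. Ported as recursion on the suffix
-- starting at i, with the accumulators spp/light.
def parseAuxA : List String → Option Int → Option Int → Option Int × Option Int
  | [], spp, light => (spp, light)
  | arg :: rest, spp, light =>
    if arg = "-s" ∨ arg = "--samples" then
      match rest with
      | [] => (spp, light)  -- i + 1 ≥ len; i += 2 ends the loop
      | y :: rest' =>
          parseAuxA rest' (match PySem.Int.ofStr? y with | some n => some n | none => spp) light
    else if arg = "-l" ∨ arg = "--light-samples" then
      match rest with
      | [] => (spp, light)
      | y :: rest' =>
          parseAuxA rest' spp (match PySem.Int.ofStr? y with | some n => some n | none => light)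
    else
      parseAuxA rest spp light

def parse_render_args (renderer_args : List String) : Option Int × Option Int :=
  parseAuxA renderer_args none none

-- ===== PORT B =====
-- B's loop body: one step of the for-each pass over the tokens, state = ((spp, light), pending).
def stepB (st : (Option Int × Option Int) × Option Char) (tok : String) :
    (Option Int × Option Int) × Option Char :=
  match st with
  | ((spp, light), pending) =>
    if pending = some 's' then
      ((match PySem.Int.ofStr? tok with | some n => some n | none => spp, light), none)
    else if pending = some 'l' then
      ((spp, match PySem.Int.ofStr? tok with | some n => some n | none => light), none)
    else if tok = "-s" ∨ tok = "--samples" then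
      ((spp, light), some 's')
    else if tok = "-l" ∨ tok = "--light-samples" then
      ((spp, light), some 'l')
    else
      ((spp, light), pending)

def parse_render_args_alt (renderer_args : List String) : Option Int × Option Int :=
  (renderer_args.foldl stepB ((none, none), none)).1

-- ===== PRECONDITION & SPEC =====
def Spec_parse_render_args (renderer_args : List String) (out : Option Int × Option Int) : Prop := out = parse_render_args_alt renderer_args
instance (renderer_args : List String) (out : Option Int × Option Int) : Decidable (Spec_parse_render_args renderer_args out) := by unfold Spec_parse_render_args; infer_instance

-- ===== CLAIM (what is proved, stated in full; the proofs are below) =====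
def Claim_equal_parse_render_args : Prop := ∀ (renderer_args : List String), Dom_parse_render_args renderer_args → Spec_parse_render_args renderer_args (parse_render_args renderer_args)

-- ===== LEMMAS AND PROOFS =====
theorem parseAuxA_eq_foldl : ∀ (args : List String) (spp light : Option Int),
    parseAuxA args spp light = (List.foldl stepB ((spp, light), none) args).1 := by
  intro args spp light
  induction args, spp, light using parseAuxA.induct with
  | case1 spp light => simp [parseAuxA]
  | case2 arg spp light hs =>
      simp [parseAuxA, hs, List.foldl, stepB]
  | case3 arg spp light hs y rest' ih =>
      rw [parseAuxA]
      simp only [hs, List.foldl]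
      rw [ih]
      simp [stepB, hs]
  | case4 arg spp light hs hl =>
      simp [parseAuxA, hs, hl, List.foldl, stepB]
  | case5 arg spp light hs hl y rest' ih =>
      rw [parseAuxA]
      simp only [hs, hl, List.foldl]
      rw [ih]
      simp [stepB, hs, hl]
  | case6 arg rest spp light hs hl ih =>
      rw [parseAuxA.eq_def]
      simp only [hs, hl, List.foldl]
      rw [ih]
      simp [stepB, hs, hl]

-- ===== VERDICT (by name: the statement is the Claim_ definition above) =====
theorem parse_render_args_spec : Claim_equal_parse_render_args := by
  intro args _
  unfold Spec_parse_render_args parse_render_args parse_render_args_alt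
  exact parseAuxA_eq_foldl args none none
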